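-- pv_equiv track=rewrite | github.com/JakobBuhler/Trucking_Problem | Functions_TruckProblem.py | get_chosen_containers
-- ===== SOURCE A (Python) =====
-- def get_chosen_containers(box_lengths, best_sample,container_length):
--     chosen_containers = []
--     for k in best_sample:
--         for i in range(len(box_lengths)):
--             if k in range(i * container_length, i*container_length + container_length):
--                   if best_sample[k] == 1:
--                         chosen_containers.append(box_lengths[i])
--     return chosen_containers
-- ===== SOURCE B (Python) =====
-- def get_chosen_containers(box_lengths, best_sample, container_length):
--     # Direct index i = k // container_length instead of scanning all box indices.
--     if container_length <= 0:
--         return []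
--     n = len(box_lengths)
--     chosen_containers = []
--     for k, v in best_sample.items():
--         if v == 1:
--             i = k // container_length
--             if 0 <= i < n:
--                 chosen_containers.append(box_lengths[i])
--     return chosen_containers
-- ===== Notes on version B (the rewrite author's own statement) =====
-- stated objective: faster
-- what changed: B computes the container index directly as i = k // container_length (with a bound check) instead of scanning every box index and testing range membership for each key.
import Mathlib
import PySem

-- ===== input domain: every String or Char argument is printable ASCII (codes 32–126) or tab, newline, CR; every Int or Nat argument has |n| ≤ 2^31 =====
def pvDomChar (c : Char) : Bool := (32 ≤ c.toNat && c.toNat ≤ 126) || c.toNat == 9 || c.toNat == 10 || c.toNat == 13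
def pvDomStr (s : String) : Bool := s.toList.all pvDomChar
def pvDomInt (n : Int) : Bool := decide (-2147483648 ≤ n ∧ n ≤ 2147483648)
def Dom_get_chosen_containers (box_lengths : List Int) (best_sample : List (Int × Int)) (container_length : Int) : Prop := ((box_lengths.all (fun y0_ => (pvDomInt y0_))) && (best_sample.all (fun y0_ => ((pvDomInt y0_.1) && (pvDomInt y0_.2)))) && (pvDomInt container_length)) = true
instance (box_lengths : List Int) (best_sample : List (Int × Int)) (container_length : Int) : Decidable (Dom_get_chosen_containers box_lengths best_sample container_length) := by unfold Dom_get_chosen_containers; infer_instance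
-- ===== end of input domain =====

-- B replaces A's scan over all box indices by the direct index k // container_length (objective: faster).

-- ===== PORT A =====
-- best_sample is a Python dict: rendered as PySem.Dict built from the association list.
-- 'k in range(a, b)' is a ≤ k < b (step-1 range membership); 'best_sample[k]' is an
-- always-successful lookup of an iterated key, ported as getD (default never used);
-- box_lengths[i] with 0 ≤ i < len is ported as getD (default never used).
def get_chosen_containers (box_lengths : List Int) (best_sample : List (Int × Int)) (container_length : Int) : List Int :=
  let d := PySem.Dict.ofList best_sample
  d.keys.foldl (fun acc k =>
    (List.range box_lengths.length).foldl (fun acc2 (i : Nat) =>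
      if (i : Int) * container_length ≤ k ∧ k < (i : Int) * container_length + container_length then
        if d.getD k 0 = 1 then acc2 ++ [box_lengths.getD i 0] else acc2
      else acc2) acc) []

-- ===== PORT B =====
def get_chosen_containers_alt (box_lengths : List Int) (best_sample : List (Int × Int)) (container_length : Int) : List Int :=
  if container_length ≤ 0 then []
  else
    let d := PySem.Dict.ofList best_sample
    d.items.foldl (fun acc kv =>
      if kv.2 = 1 then
        let i := PySem.Int.floordiv kv.1 container_length
        if 0 ≤ i ∧ i < (box_lengths.length : Int) then acc ++ [box_lengths.getD i.toNat 0] else acc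
      else acc) []

-- ===== PRECONDITION & SPEC =====
def Spec_get_chosen_containers (box_lengths : List Int) (best_sample : List (Int × Int)) (container_length : Int) (out : List Int) : Prop := out = get_chosen_containers_alt box_lengths best_sample container_length
instance (box_lengths : List Int) (best_sample : List (Int × Int)) (container_length : Int) (out : List Int) : Decidable (Spec_get_chosen_containers box_lengths best_sample container_length out) := by unfold Spec_get_chosen_containers; infer_instance

-- ===== CLAIM (what is proved, stated in full; the proofs are below) =====
def Claim_equal_get_chosen_containers : Prop := ∀ (box_lengths : List Int) (best_sample : List (Int × Int)) (container_length : Int), Dom_get_chosen_containers box_lengths best_sample container_length → Spec_get_chosen_containers box_lengths best_sample container_length (get_chosen_containers box_lengths best_sample container_length)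

-- ===== LEMMAS AND PROOFS =====

-- filter of a Nat range by equality with a fixed j
theorem pv_filter_range_eq (n j : Nat) :
    (List.range n).filter (fun i => decide (i = j)) = if j < n then [j] else [] := by
  induction n with
  | zero => simp
  | succ n ih =>
    rw [List.range_succ, List.filter_append, ih]
    by_cases h : j = n
    · subst h; simp
    · by_cases hlt : j < n
      · simp [hlt, Nat.lt_succ_of_lt hlt, eq_comm, h]
      · have h2 : ¬ j < n + 1 := by omega
        simp [hlt, h2, eq_comm, h]

-- the closed form of A's inner scan for key k with dict value w
def pv_innerOut (bl : List Int) (cl k w : Int) : List Int :=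
  if cl ≤ 0 then []
  else if w = 1 then
    (if 0 ≤ PySem.Int.floordiv k cl ∧ PySem.Int.floordiv k cl < (bl.length : Int) then
       [bl.getD (PySem.Int.floordiv k cl).toNat 0] else [])
  else []

-- A's inner scan over all box indices equals the direct-index closed form
theorem pv_inner_eq (bl : List Int) (cl k w : Int) (acc : List Int) :
    (List.range bl.length).foldl (fun acc2 (i : Nat) =>
      if (i : Int) * cl ≤ k ∧ k < (i : Int) * cl + cl then
        if w = 1 then acc2 ++ [bl.getD i 0] else acc2
      else acc2) acc
    = acc ++ pv_innerOut bl cl k w := by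
  have hstep : (fun (acc2 : List Int) (i : Nat) =>
      if (i : Int) * cl ≤ k ∧ k < (i : Int) * cl + cl then
        if w = 1 then acc2 ++ [bl.getD i 0] else acc2
      else acc2)
      = fun acc2 (i : Nat) =>
        if ((i : Int) * cl ≤ k ∧ k < (i : Int) * cl + cl) ∧ w = 1 then acc2 ++ [bl.getD i 0]
        else acc2 := by
    funext acc2 i
    by_cases h1 : (i : Int) * cl ≤ k ∧ k < (i : Int) * cl + cl <;> by_cases h2 : w = 1 <;>
      simp [h1, h2]
  rw [hstep, PySem.List.foldl_append_ite
    (fun (i : Nat) => ((i : Int) * cl ≤ k ∧ k < (i : Int) * cl + cl) ∧ w = 1)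
    (fun (i : Nat) => bl.getD i 0)]
  congr 1
  unfold pv_innerOut
  by_cases hcl : cl ≤ 0
  · rw [List.filter_eq_nil_iff.mpr ?_]
    · simp [hcl]
    · intro i _
      simp only [decide_eq_true_eq, not_and]
      rintro ⟨h1, h2⟩
      omega
  · have hpos : 0 < cl := by omega
    by_cases hw : w = 1
    · have hiff : ∀ i : Nat,
          (((i : Int) * cl ≤ k ∧ k < (i : Int) * cl + cl) ∧ w = 1)
          ↔ PySem.Int.floordiv k cl = (i : Int) := by
        intro i
        rw [PySem.Int.floordiv_eq_iff_of_pos hpos]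
        constructor
        · rintro ⟨⟨h1, h2⟩, _⟩; exact ⟨h1, by nlinarith⟩
        · rintro ⟨h1, h2⟩; exact ⟨⟨h1, by nlinarith⟩, hw⟩
      set fd := PySem.Int.floordiv k cl with hfd
      by_cases hneg : fd < 0
      · rw [List.filter_eq_nil_iff.mpr ?_]
        · simp only [if_neg hcl, if_pos hw, List.map_nil]
          rw [if_neg (by omega)]
        · intro i _
          simp only [decide_eq_true_eq]
          rw [hiff i]
          omega
      · have hfun : (fun i : Nat => decide (((i : Int) * cl ≤ k ∧ k < (i : Int) * cl + cl) ∧ w = 1))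
            = fun i : Nat => decide (i = fd.toNat) := by
          funext i
          simp only [decide_eq_decide]
          rw [hiff i]
          omega
        rw [hfun, pv_filter_range_eq]
        by_cases hb : fd.toNat < bl.length
        · rw [if_pos hb]
          simp only [if_neg hcl, if_pos hw, List.map_cons, List.map_nil]
          rw [if_pos (by omega)]
        · rw [if_neg hb]
          simp only [if_neg hcl, if_pos hw, List.map_nil]
          rw [if_neg (by omega)]
    · rw [List.filter_eq_nil_iff.mpr ?_]
      · simp [hw]
      · intro i _
        simp only [decide_eq_true_eq, not_and]
        intro _
        exact hw

-- ===== VERDICT (by name: the statement is the Claim_ definition above) =====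
theorem get_chosen_containers_spec : Claim_equal_get_chosen_containers := by
  intro bl bs cl _
  unfold Spec_get_chosen_containers get_chosen_containers get_chosen_containers_alt
  dsimp only
  set d := PySem.Dict.ofList bs with hd
  have hnd : d.keys.Nodup := PySem.Dict.nodup_keys_ofList bs
  have hA : ∀ (L : List (Int × Int)) (acc : List Int),
      (∀ kv ∈ L, d.getD kv.1 0 = kv.2) →
      (L.map (·.1)).foldl (fun acc k =>
        (List.range bl.length).foldl (fun acc2 (i : Nat) =>
          if (i : Int) * cl ≤ k ∧ k < (i : Int) * cl + cl then
            if d.getD k 0 = 1 then acc2 ++ [bl.getD i 0] else acc2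
          else acc2) acc) acc
      = acc ++ L.flatMap (fun kv => pv_innerOut bl cl kv.1 kv.2) := by
    intro L
    induction L with
    | nil => intro acc _; simp
    | cons kv L ih =>
      intro acc hmem
      simp only [List.map_cons, List.foldl_cons, List.flatMap_cons]
      rw [pv_inner_eq bl cl kv.1 (d.getD kv.1 0) acc,
          hmem kv (List.mem_cons_self),
          ih _ (fun p hp => hmem p (List.mem_cons_of_mem _ hp))]
      simp
  have hkeys : d.keys = d.items.map (·.1) := rfl
  have hlook : ∀ kv ∈ d.items, d.getD kv.1 0 = kv.2 := by
    intro kv hkv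
    exact PySem.Dict.getD_of_mem_items d (by simpa using hkv) hnd 0
  rw [hkeys, hA d.items [] hlook]
  by_cases hcl : cl ≤ 0
  · rw [if_pos hcl]
    rw [List.flatMap_eq_nil_iff.mpr (by intro kv _; simp [pv_innerOut, hcl])]
    simp
  · rw [if_neg hcl]
    have hB : ∀ (L : List (Int × Int)) (acc : List Int),
        L.foldl (fun acc kv =>
          if kv.2 = 1 then
            if 0 ≤ PySem.Int.floordiv kv.1 cl ∧ PySem.Int.floordiv kv.1 cl < (bl.length : Int) then
              acc ++ [bl.getD (PySem.Int.floordiv kv.1 cl).toNat 0] else acc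
          else acc) acc
        = acc ++ L.flatMap (fun kv => pv_innerOut bl cl kv.1 kv.2) := by
      intro L
      induction L with
      | nil => intro acc; simp
      | cons kv L ih =>
        intro acc
        simp only [List.foldl_cons, List.flatMap_cons]
        rw [ih]
        by_cases h1 : kv.2 = 1 <;>
          by_cases h2 : 0 ≤ PySem.Int.floordiv kv.1 cl ∧ PySem.Int.floordiv kv.1 cl < (bl.length : Int) <;>
          simp [pv_innerOut, h1, h2, hcl]
    simpa using (hB d.items []).symm
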